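-- pv_equiv track=rewrite | github.com/LongjuBai/EECS598_LLM_RelationExtraction | utils.py | struct_response_entity
-- ===== SOURCE A (Python) =====
-- def parse_list_string(s, marks_removed=''):
--     if type(s) is not str:
--         return []
--     start, end = s.find('['), s.find(']')
--     if start == -1 or end == -1:
--         return []
--     item_list = s[start+1:end].split(',')
--     return [item.strip().strip(marks_removed) for item in item_list]
--
-- def struct_response_entity(response, entity_types):
--     def find_entity_type(s):
--         return s.split(':')[-1][:-1]
--     entity_type_dict = {entity_type: [] for entity_type in entity_types}
--     entity_list = parse_list_string(response) # ['"fds:Per"', '"ior:Loc"', '"vio:Org"']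
--     for entity in entity_list:
--         entity_type = find_entity_type(entity)
--         if entity_type in entity_type_dict:
--             entity_type_dict[entity_type].append(entity)
--     return entity_type_dict
-- ===== SOURCE B (Python) =====
-- def parse_list_string(s, marks_removed=''):
--     if type(s) is not str:
--         return []
--     start, end = s.find('['), s.find(']')
--     if start == -1 or end == -1:
--         return []
--     item_list = s[start+1:end].split(',')
--     return [item.strip().strip(marks_removed) for item in item_list]
--
-- def struct_response_entity(response, entity_types):
--     def find_entity_type(s):
--         return s.split(':')[-1][:-1]
--     entity_list = parse_list_string(response)
--     out = {}
--     for t in entity_types: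
--         if t not in out:
--             out[t] = [e for e in entity_list if find_entity_type(e) == t]
--     return out
-- ===== Notes on version B (the rewrite author's own statement) =====
-- stated objective: alternative
-- what changed: Inverts the traversal: instead of A's single pass over the entities dispatching each into pre-initialised dict buckets, B loops over the types (skipping duplicates) and builds each bucket by filtering the parsed entity list for that type.
import Mathlib
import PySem

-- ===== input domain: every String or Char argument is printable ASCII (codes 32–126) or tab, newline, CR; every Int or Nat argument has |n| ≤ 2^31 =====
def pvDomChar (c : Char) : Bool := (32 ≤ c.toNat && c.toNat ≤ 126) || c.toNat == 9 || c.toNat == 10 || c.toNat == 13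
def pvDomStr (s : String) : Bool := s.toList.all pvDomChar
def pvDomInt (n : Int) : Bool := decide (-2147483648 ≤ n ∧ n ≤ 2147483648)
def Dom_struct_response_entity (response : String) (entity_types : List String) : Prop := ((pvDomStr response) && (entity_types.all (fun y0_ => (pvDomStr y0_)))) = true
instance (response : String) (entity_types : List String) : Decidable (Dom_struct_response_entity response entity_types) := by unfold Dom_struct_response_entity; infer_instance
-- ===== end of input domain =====

-- B inverts the traversal: A makes one pass over the entities dispatching each into
-- pre-initialised dict buckets; B loops over the types (skipping duplicates) and builds
-- each bucket by filtering the parsed entity list for that type (alternative decomposition).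

-- ===== PORT A =====
-- shared helper (identical source in A and B): parse_list_string(s, marks_removed)
def parse_list_string (s : String) (marks_removed : String) : List String :=
  let start := PySem.Str.find s "["
  let stop := PySem.Str.find s "]"
  if start = -1 ∨ stop = -1 then []
  else
    let item_list := (PySem.Str.split? (PySem.Str.slice s (some (start + 1)) (some stop)) ",").getD []
    item_list.map (fun item => PySem.Str.stripChars (PySem.Str.strip item) marks_removed)

-- shared helper (identical source in A and B): find_entity_type(s) = s.split(':')[-1][:-1]
def find_entity_type (s : String) : String :=
  let parts := (PySem.Str.split? s ":").getD []
  let last := (PySem.List.pyGet? parts (-1)).getD ""   -- split(':') is never empty, so [-1] never raises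
  PySem.Str.slice last none (some (-1))

def struct_response_entity (response : String) (entity_types : List String) : List (String × List String) :=
  let d0 : PySem.Dict String (List String) :=
    entity_types.foldl (fun d t => d.insert t []) PySem.Dict.empty
  let entity_list := parse_list_string response ""
  let d := entity_list.foldl (fun d entity =>
      let t := find_entity_type entity
      if d.contains t then d.modify t [] (· ++ [entity]) else d) d0
  d.items

-- ===== PORT B =====
-- the 'for t in entity_types' loop: out starts {}, and out[t] is only ever set when
-- 't not in out', so the dict is exactly an assoc list extended at the end.
def bBuckets (es : List String) (ts : List String) (out : List (String × List String)) : List (String × List String) :=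
  match ts with
  | [] => out
  | t :: rest =>
      if (out.map Prod.fst).contains t then bBuckets es rest out
      else bBuckets es rest (out ++ [(t, es.filter (fun e => find_entity_type e == t))])

def struct_response_entity_alt (response : String) (entity_types : List String) : List (String × List String) :=
  bBuckets (parse_list_string response "") entity_types []

-- ===== PRECONDITION & SPEC =====
def Spec_struct_response_entity (response : String) (entity_types : List String) (out : List (String × List String)) : Prop := out = struct_response_entity_alt response entity_types
instance (response : String) (entity_types : List String) (out : List (String × List String)) : Decidable (Spec_struct_response_entity response entity_types out) := by unfold Spec_struct_response_entity; infer_instance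

-- ===== CLAIM (what is proved, stated in full; the proofs are below) =====
def Claim_equal_struct_response_entity : Prop := ∀ (response : String) (entity_types : List String), Dom_struct_response_entity response entity_types → Spec_struct_response_entity response entity_types (struct_response_entity response entity_types)

-- ===== LEMMAS AND PROOFS =====

-- A's dispatch loop never changes the key list.
theorem keysA (es : List String) (d : PySem.Dict String (List String)) :
    (es.foldl (fun d entity =>
      let t := find_entity_type entity
      if d.contains t then d.modify t [] (· ++ [entity]) else d) d).keys = d.keys := by
  induction es generalizing d with
  | nil => rfl
  | cons e es ih =>
    simp only [List.foldl_cons]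
    by_cases h : d.contains (find_entity_type e)
    · rw [if_pos h, ih, PySem.Dict.keys_modify,
        PySem.Dict.keys_insert_of_contains]
      exact h
    · rw [if_neg h]; exact ih d

-- A's dispatch loop, read at a key the dict contains, appends exactly the matching entities.
theorem getA (es : List String) (d : PySem.Dict String (List String)) (t : String)
    (ht : d.contains t = true) :
    (es.foldl (fun d entity =>
      let t := find_entity_type entity
      if d.contains t then d.modify t [] (· ++ [entity]) else d) d).getD t []
    = d.getD t [] ++ es.filter (fun e => find_entity_type e == t) := by
  induction es generalizing d with
  | nil => simp
  | cons e es ih =>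
    simp only [List.foldl_cons, List.filter_cons]
    by_cases h : d.contains (find_entity_type e)
    · rw [if_pos h]
      rw [ih _ (by rw [PySem.Dict.contains_modify]; simp [ht])]
      rw [PySem.Dict.getD_modify]
      by_cases he : find_entity_type e = t
      · simp [he]
      · have hb : (find_entity_type e == t) = false := by simp [he]
        rw [hb, if_neg (fun hh => he hh.symm)]
        simp
    · rw [if_neg h]
      have he : (find_entity_type e == t) = false := by
        simp only [beq_eq_false_iff_ne, ne_eq]
        intro hh; rw [hh] at h; exact h ht
      simp [he, ih d ht]

-- initialising loop: every key reads [].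
theorem getD_init (ts : List String) (d : PySem.Dict String (List String))
    (hd : ∀ t, d.getD t [] = []) (t : String) :
    (ts.foldl (fun d t => d.insert t []) d).getD t [] = [] := by
  induction ts generalizing d with
  | nil => exact hd t
  | cons s ts ih =>
    simp only [List.foldl_cons]
    refine ih _ (fun t' => ?_)
    rw [PySem.Dict.getD_insert]; split <;> simp [hd]

theorem keys_init (ts : List String) :
    ((ts.foldl (fun d t => d.insert t []) PySem.Dict.empty) :
      PySem.Dict String (List String)).keys = PySem.Set.ofList ts := by
  rw [show (fun (d : PySem.Dict String (List String)) t => d.insert t [])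
      = (fun d t => d.insert t ((fun (_ : PySem.Dict String (List String)) (_ : String) => ([] : List String)) d t)) from rfl,
    PySem.Dict.keys_foldl_insert]
  simpa using PySem.Set.update_empty ts

-- B's loop grows an assoc list over a prefix-set of keys: it computes the map of the
-- deduplicated type list (first occurrences) under t ↦ (t, filter …).
theorem bBuckets_eq (es ts : List String) (L : List String) :
    bBuckets es ts (L.map (fun t => (t, es.filter (fun e => find_entity_type e == t))))
    = (ts.foldl PySem.Set.add L).map (fun t => (t, es.filter (fun e => find_entity_type e == t))) := by
  induction ts generalizing L with
  | nil => rfl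
  | cons t ts ih =>
    simp only [bBuckets, List.foldl_cons]
    have hfst : (L.map (fun t => (t, es.filter (fun e => find_entity_type e == t)))).map Prod.fst = L := by
      simp [List.map_map, Function.comp_def]
    rw [hfst]
    by_cases h : L.contains t
    · rw [if_pos h, show PySem.Set.add L t = L from by
        simp [List.contains_iff_mem.mp h]]
      exact ih L
    · rw [if_neg h, show PySem.Set.add L t = L ++ [t] from by
        simp [PySem.Set.add_eq_ite]
        intro hm; exact absurd (List.contains_iff_mem.mpr hm) h]
      have := ih (L ++ [t])
      simpa [List.map_append] using this

-- ===== VERDICT (by name: the statement is the Claim_ definition above) =====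
theorem struct_response_entity_spec : Claim_equal_struct_response_entity := by
  intro response entity_types _
  unfold Spec_struct_response_entity struct_response_entity struct_response_entity_alt
  simp only []
  set es := parse_list_string response "" with hes
  set d0 : PySem.Dict String (List String) :=
    entity_types.foldl (fun d t => d.insert t []) PySem.Dict.empty with hd0
  have hk0 : d0.keys = PySem.Set.ofList entity_types := keys_init entity_types
  have hnd : (PySem.Set.ofList entity_types).Nodup := PySem.Set.nodup_ofList _
  have hB : bBuckets es entity_types []
      = (PySem.Set.ofList entity_types).map (fun t => (t, es.filter (fun e => find_entity_type e == t))) := by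
    have := bBuckets_eq es entity_types []
    simpa [PySem.Set.ofList_eq_foldl] using this
  rw [hB, PySem.Dict.items_eq_map_keys _ (by rw [keysA]; rw [hk0]; exact hnd) [],
      keysA, hk0]
  refine List.map_congr_left (fun k hk => ?_)
  have hmem : k ∈ entity_types := (PySem.Set.mem_ofList _ _).mp hk
  have hc : d0.contains k = true := by
    rw [PySem.Dict.contains_iff_mem_keys, hk0]; exact hk
  rw [getA es d0 k hc, getD_init entity_types PySem.Dict.empty (fun t => rfl) k]
  simp
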